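-- pv_equiv track=rewrite | github.com/KimDeokjung/AlgorithmProblem | codingTest/230621/3.py | solution
-- ===== SOURCE A (Python) =====
-- def solution(S, C):
--     result = 0
--     checkSum = []
--     tmp = []
--     flag = "?"
--
--     for x in range(len(S)):
--         if S[x] == flag:
--             tmp.append(C[x])
--         else:
--             if len(tmp) > 0: checkSum.append(tmp)
--             tmp = [C[x]]
--             flag = S[x]
--
--     if len(tmp) > 0: checkSum.append(tmp)
--
--     for x in checkSum:
--         result += sum(x)
--         result -= max(x)
--
--     return result
-- ===== SOURCE B (Python) =====
-- def solution(S, C):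
--     result = 0
--     started = False
--     prev = None
--     groupSum = 0
--     groupMax = 0
--     for i, s in enumerate(S):
--         c = C[i]
--         if started and s == prev:
--             groupSum += c
--             if c > groupMax:
--                 groupMax = c
--         else:
--             if started:
--                 result += groupSum - groupMax
--             prev = s
--             groupSum = c
--             groupMax = c
--             started = True
--     if started:
--         result += groupSum - groupMax
--     return result
-- ===== Notes on version B (the rewrite author's own statement) =====
-- stated objective: faster
-- what changed: Single pass with a running group sum and group max in O(1) extra state, instead of materialising a list of per-group value lists and then aggregating each with sum() and max(); avoiding per-element list appends and the second aggregation pass gives a constant-factor speedup.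
import Mathlib
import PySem

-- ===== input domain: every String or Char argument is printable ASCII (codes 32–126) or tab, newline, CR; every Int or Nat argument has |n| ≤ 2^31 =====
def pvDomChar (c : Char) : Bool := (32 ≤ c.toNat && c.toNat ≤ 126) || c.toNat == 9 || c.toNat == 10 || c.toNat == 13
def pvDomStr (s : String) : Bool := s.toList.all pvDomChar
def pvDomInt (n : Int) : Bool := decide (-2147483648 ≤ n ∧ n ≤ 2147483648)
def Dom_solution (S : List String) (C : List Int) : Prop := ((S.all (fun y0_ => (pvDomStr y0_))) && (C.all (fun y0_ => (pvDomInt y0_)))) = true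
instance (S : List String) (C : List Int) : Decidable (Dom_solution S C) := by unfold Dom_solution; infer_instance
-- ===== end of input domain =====

-- B replaces A's list-of-group-lists with a one-pass running group sum/max fold (alternative decomposition, same asymptotic cost).
-- ===== PORT A =====
-- loop body of A's first for-loop; state = (checkSum, tmp, flag)
def pvAStep (S : List String) (C : List Int)
    (st : List (List Int) × List Int × String) (x : Int) :
    List (List Int) × List Int × String :=
  let sx := PySem.List.pyGetD S x ""
  let cx := PySem.List.pyGetD C x 0
  if sx == st.2.2 then (st.1, st.2.1 ++ [cx], st.2.2)
  else ((if st.2.1.length > 0 then st.1 ++ [st.2.1] else st.1), [cx], sx)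

def solution (S : List String) (C : List Int) : Int :=
  let st := (PySem.List.pyRange 0 (PySem.List.len S) 1).foldl (pvAStep S C) ([], [], "?")
  let checkSum := if st.2.1.length > 0 then st.1 ++ [st.2.1] else st.1
  checkSum.foldl (fun r g => r + g.sum - ((PySem.List.max? g (fun y => y)).getD 0)) 0

-- ===== PORT B =====
-- loop body of B's for-loop; state = (result, prev, groupSum, groupMax, started)
def pvBStep (C : List Int)
    (st : Int × Option String × Int × Int × Bool) (p : Int × String) :
    Int × Option String × Int × Int × Bool :=
  let c := PySem.List.pyGetD C p.1 0
  if st.2.2.2.2 && (st.2.1 == some p.2) then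
    (st.1, st.2.1, st.2.2.1 + c, if c > st.2.2.2.1 then c else st.2.2.2.1, st.2.2.2.2)
  else
    ((if st.2.2.2.2 then st.1 + st.2.2.1 - st.2.2.2.1 else st.1), some p.2, c, c, true)

def solution_alt (S : List String) (C : List Int) : Int :=
  let st := (PySem.List.enumerate S 0).foldl (pvBStep C) (0, none, 0, 0, false)
  if st.2.2.2.2 then st.1 + st.2.2.1 - st.2.2.2.1 else st.1

-- ===== PRECONDITION & SPEC =====
-- Pre_ excludes exactly the inputs with len(S) > len(C), on which both Pythons raise IndexError at C[x].
def Pre_solution (S : List String) (C : List Int) : Prop := S.length ≤ C.length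
instance (S : List String) (C : List Int) : Decidable (Pre_solution S C) := by unfold Pre_solution; infer_instance
def pvWitness_solution : List String × List Int := (["a", "a", "b"], [1, 2, 3])

def Spec_solution (S : List String) (C : List Int) (out : Int) : Prop := out = solution_alt S C
instance (S : List String) (C : List Int) (out : Int) : Decidable (Spec_solution S C out) := by unfold Spec_solution; infer_instance

-- ===== CLAIM (what is proved, stated in full; the proofs are below) =====
def Claim_equal_solution : Prop := ∀ (S : List String) (C : List Int), Dom_solution S C → Pre_solution S C → Spec_solution S C (solution S C)

-- ===== LEMMAS AND PROOFS =====
-- max of a nonempty Python list as a foldl (A's max(x))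
def pvMaxOf : List Int → Int
  | [] => 0
  | h :: t => t.foldl max h

-- A's second loop as a function of checkSum
def pvRes (cs : List (List Int)) : Int :=
  cs.foldl (fun r g => r + g.sum - ((PySem.List.max? g (fun y => y)).getD 0)) 0

-- invariant tying A's loop state to B's loop state
def pvInv (a : List (List Int) × List Int × String)
    (b : Int × Option String × Int × Int × Bool) : Prop :=
  (a = ([], [], "?") ∧ b = (0, none, 0, 0, false))
  ∨ (a.2.1 ≠ [] ∧ b = (pvRes a.1, some a.2.2, a.2.1.sum, pvMaxOf a.2.1, true))

theorem pvMax_getD (g : List Int) (hg : g ≠ []) :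
    ((PySem.List.max? g (fun y => y)).getD 0) = pvMaxOf g := by
  cases g with
  | nil => exact absurd rfl hg
  | cons h t => rw [PySem.List.max?_id_cons]; rfl

theorem pvRes_append (cs : List (List Int)) (g : List Int) (hg : g ≠ []) :
    pvRes (cs ++ [g]) = pvRes cs + g.sum - pvMaxOf g := by
  unfold pvRes
  rw [List.foldl_append]
  simp only [List.foldl_cons, List.foldl_nil, pvMax_getD g hg]

theorem pvMaxOf_append (t : List Int) (ht : t ≠ []) (c : Int) :
    pvMaxOf (t ++ [c]) = if c > pvMaxOf t then c else pvMaxOf t := by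
  cases t with
  | nil => exact absurd rfl ht
  | cons h u =>
      show (u ++ [c]).foldl max h = if c > u.foldl max h then c else u.foldl max h
      rw [List.foldl_append]
      show max (u.foldl max h) c = _
      omega

theorem pvInv_step (S : List String) (C : List Int) (a : List (List Int) × List Int × String)
    (b : Int × Option String × Int × Int × Bool) (x : Int) (h : pvInv a b) :
    pvInv (pvAStep S C a x) (pvBStep C b (x, PySem.List.pyGetD S x "")) := by
  obtain ⟨c1, c2, c3⟩ := a
  rcases h with ⟨ha, hb⟩ | ⟨htmp, hb⟩
  · -- initial state: B takes its else-branch, A opens (or silently starts) the first group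
    injection ha with h1 h23
    injection h23 with h2 h3
    subst h1 h2 h3 hb
    by_cases hs : PySem.List.pyGetD S x "" = "?"
    · simp [pvAStep, pvBStep, pvInv, hs, pvRes, pvMaxOf]
    · simp [pvAStep, pvBStep, pvInv, hs, pvRes, pvMaxOf]
  · -- running state: both compare the current string with the open group's string
    subst hb
    by_cases hs : PySem.List.pyGetD S x "" = c3
    · -- same group: extend
      refine Or.inr ?_
      simp only [pvAStep, pvBStep, hs]
      simp only [beq_self_eq_true, if_true, Bool.true_and, Option.some.injEq]
      refine ⟨by simp [htmp], ?_⟩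
      simp [List.sum_append, pvMaxOf_append c2 htmp]
    · -- new group: B finalises via result, A appends tmp to checkSum
      refine Or.inr ?_
      have hlen : c2.length > 0 := List.length_pos_iff.mpr htmp
      simp only [pvAStep, pvBStep]
      have h1 : ((PySem.List.pyGetD S x "") == c3) = false := by simpa using hs
      have h2 : ((some c3 : Option String) == some (PySem.List.pyGetD S x "")) = false := by
        simp; intro h; exact hs h.symm
      simp only [h1, h2, Bool.true_and, if_pos hlen]
      exact ⟨by simp, by simp [pvRes_append c1 c2 htmp, pvMaxOf]⟩

theorem pvInv_fold (S : List String) (C : List Int) (L : List Int)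
    (a : List (List Int) × List Int × String)
    (b : Int × Option String × Int × Int × Bool) (h : pvInv a b) :
    pvInv (L.foldl (pvAStep S C) a)
      (L.foldl (fun st x => pvBStep C st (x, PySem.List.pyGetD S x "")) b) := by
  induction L generalizing a b with
  | nil => exact h
  | cons x t ih => exact ih _ _ (pvInv_step S C a b x h)

theorem pvInv_final (a : List (List Int) × List Int × String)
    (b : Int × Option String × Int × Int × Bool) (h : pvInv a b) :
    (if a.2.1.length > 0 then a.1 ++ [a.2.1] else a.1).foldl
        (fun r g => r + g.sum - ((PySem.List.max? g (fun y => y)).getD 0)) 0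
      = (if b.2.2.2.2 then b.1 + b.2.2.1 - b.2.2.2.1 else b.1) := by
  rcases h with ⟨ha, hb⟩ | ⟨htmp, hb⟩
  · subst hb; rw [ha]; rfl
  · subst hb
    have hlen : a.2.1.length > 0 := List.length_pos_iff.mpr htmp
    simp only [if_pos hlen]
    exact pvRes_append a.1 a.2.1 htmp

-- ===== VERDICT (by name: the statement is the Claim_ definition above) =====
theorem solution_spec : Claim_equal_solution := by
  intro S C _ _
  show solution S C = solution_alt S C
  unfold solution solution_alt
  rw [PySem.List.enumerate_eq_map_pyRange (d := ""), List.foldl_map]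
  exact pvInv_final _ _ (pvInv_fold S C _ _ _ (Or.inl ⟨rfl, rfl⟩))
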